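-- pv_equiv track=rewrite | github.com/Hanaxx1/Talent_transfer_dataset | trans_data_process/test.py | has_list_b_words_after_list_a
-- ===== SOURCE A (Python) =====
-- def has_list_b_words_after_list_a(sentence, listA, listB):
--     for wordA in listA:
--         if wordA in sentence:
--             for wordB in listB:
--                 if wordB in sentence:
--                     if sentence.find(wordB) > sentence.find(wordA):
--                         return True
--     return False
-- ===== SOURCE B (Python) =====
-- def has_list_b_words_after_list_a(sentence, listA, listB):
--     posA = [sentence.find(w) for w in listA if w in sentence]
--     posB = [sentence.find(w) for w in listB if w in sentence]
--     return bool(posA) and bool(posB) and max(posB) > min(posA)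
-- ===== Notes on version B (the rewrite author's own statement) =====
-- stated objective: alternative
-- what changed: Instead of A's nested early-return loops comparing find positions per (A-word, B-word) pair, B collects each present word's find position once and compares the min over A positions with the max over B positions.
import Mathlib
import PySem

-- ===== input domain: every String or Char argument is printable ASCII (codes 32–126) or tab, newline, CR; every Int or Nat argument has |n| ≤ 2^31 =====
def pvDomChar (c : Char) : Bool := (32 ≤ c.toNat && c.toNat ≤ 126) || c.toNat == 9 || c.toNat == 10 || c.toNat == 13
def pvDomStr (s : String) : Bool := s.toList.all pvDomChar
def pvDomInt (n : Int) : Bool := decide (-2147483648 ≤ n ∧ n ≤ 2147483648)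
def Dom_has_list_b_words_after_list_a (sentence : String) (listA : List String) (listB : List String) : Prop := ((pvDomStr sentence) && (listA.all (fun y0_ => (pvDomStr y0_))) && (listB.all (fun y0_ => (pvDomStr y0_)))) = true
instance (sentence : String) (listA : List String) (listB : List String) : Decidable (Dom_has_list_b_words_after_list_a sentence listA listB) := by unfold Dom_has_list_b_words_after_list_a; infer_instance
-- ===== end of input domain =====

-- B replaces A's nested early-return loops by one pass collecting each present word's find
-- position, then compares min over A positions with max over B positions (objective: alternative).

-- ===== PORT A =====
-- inner 'for wordB in listB' loop of A (returns true = the Python 'return True')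
def pvInnerA (sentence wordA : String) : List String → Bool
  | [] => false
  | wordB :: rest =>
    if PySem.Str.isIn wordB sentence then
      if PySem.Str.find sentence wordB > PySem.Str.find sentence wordA then true
      else pvInnerA sentence wordA rest
    else pvInnerA sentence wordA rest

def has_list_b_words_after_list_a (sentence : String) (listA : List String) (listB : List String) : Bool :=
  match listA with
  | [] => false
  | wordA :: rest =>
    if PySem.Str.isIn wordA sentence then
      if pvInnerA sentence wordA listB then true
      else has_list_b_words_after_list_a sentence rest listB
    else has_list_b_words_after_list_a sentence rest listB

-- ===== PORT B =====
def has_list_b_words_after_list_a_alt (sentence : String) (listA : List String) (listB : List String) : Bool :=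
  let posA := (listA.filter (fun w => PySem.Str.isIn w sentence)).map (fun w => PySem.Str.find sentence w)
  let posB := (listB.filter (fun w => PySem.Str.isIn w sentence)).map (fun w => PySem.Str.find sentence w)
  !posA.isEmpty && !posB.isEmpty &&
    match PySem.List.max? posB (fun x => x), PySem.List.min? posA (fun x => x) with
    | some b, some a => decide (b > a)
    | _, _ => false

-- ===== PRECONDITION & SPEC =====
def Spec_has_list_b_words_after_list_a (sentence : String) (listA : List String) (listB : List String) (out : Bool) : Prop := out = has_list_b_words_after_list_a_alt sentence listA listB
instance (sentence : String) (listA : List String) (listB : List String) (out : Bool) : Decidable (Spec_has_list_b_words_after_list_a sentence listA listB out) := by unfold Spec_has_list_b_words_after_list_a; infer_instance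

-- ===== CLAIM (what is proved, stated in full; the proofs are below) =====
def Claim_equal_has_list_b_words_after_list_a : Prop := ∀ (sentence : String) (listA : List String) (listB : List String), Dom_has_list_b_words_after_list_a sentence listA listB → Spec_has_list_b_words_after_list_a sentence listA listB (has_list_b_words_after_list_a sentence listA listB)

-- ===== LEMMAS AND PROOFS =====

lemma pvInnerA_eq_any (s wa : String) (lb : List String) :
    pvInnerA s wa lb =
      lb.any (fun wb => PySem.Str.isIn wb s && decide (PySem.Str.find s wb > PySem.Str.find s wa)) := by
  induction lb with
  | nil => rfl
  | cons wb rest ih =>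
    simp only [pvInnerA, List.any_cons]
    split_ifs with h1 h2 <;> simp_all

lemma portA_eq_any (s : String) (la lb : List String) :
    has_list_b_words_after_list_a s la lb =
      la.any (fun wa => PySem.Str.isIn wa s && pvInnerA s wa lb) := by
  induction la with
  | nil => rfl
  | cons wa rest ih =>
    simp only [has_list_b_words_after_list_a, List.any_cons]
    split_ifs with h1 h2 <;> simp_all

lemma portA_iff (s : String) (la lb : List String) :
    has_list_b_words_after_list_a s la lb = true ↔
      ∃ wa ∈ la, PySem.Str.isIn wa s = true ∧
        ∃ wb ∈ lb, PySem.Str.isIn wb s = true ∧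
          PySem.Str.find s wa < PySem.Str.find s wb := by
  simp [portA_eq_any, pvInnerA_eq_any, List.any_eq_true]

-- the min/max comparison of B decides exactly "some pair a ∈ xs, b ∈ ys with a < b"
lemma minmax_iff (xs ys : List Int) :
    ((!xs.isEmpty && !ys.isEmpty &&
      match PySem.List.max? ys (fun x => x), PySem.List.min? xs (fun x => x) with
      | some b, some a => decide (b > a)
      | _, _ => false) = true) ↔ ∃ a ∈ xs, ∃ b ∈ ys, a < b := by
  constructor
  · intro h
    simp only [Bool.and_eq_true] at h
    obtain ⟨⟨_, _⟩, h3⟩ := h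
    cases hmax : PySem.List.max? ys (fun x => x) with
    | none => rw [hmax] at h3; cases PySem.List.min? xs (fun x => x) <;> simp at h3
    | some b =>
      cases hmin : PySem.List.min? xs (fun x => x) with
      | none => rw [hmax, hmin] at h3; simp at h3
      | some a =>
        rw [hmax, hmin] at h3
        simp only [gt_iff_lt, decide_eq_true_eq] at h3
        exact ⟨a, PySem.List.min?_mem hmin, b, PySem.List.max?_mem hmax, h3⟩
  · rintro ⟨a, ha, b, hb, hab⟩
    have hxs : xs ≠ [] := by rintro rfl; exact absurd ha (List.not_mem_nil)
    have hys : ys ≠ [] := by rintro rfl; exact absurd hb (List.not_mem_nil)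
    cases hmin : PySem.List.min? xs (fun x => x) with
    | none => exact absurd ((PySem.List.min?_eq_none_iff xs _).mp hmin) hxs
    | some m =>
      cases hmax : PySem.List.max? ys (fun x => x) with
      | none => exact absurd ((PySem.List.max?_eq_none_iff ys _).mp hmax) hys
      | some M =>
        have h1 : m ≤ a := PySem.List.min?_isMin hmin a ha
        have h2 : b ≤ M := PySem.List.max?_isMax hmax b hb
        simp [hxs, hys]
        omega

lemma portB_iff (s : String) (la lb : List String) :
    has_list_b_words_after_list_a_alt s la lb = true ↔
      ∃ wa ∈ la, PySem.Str.isIn wa s = true ∧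
        ∃ wb ∈ lb, PySem.Str.isIn wb s = true ∧
          PySem.Str.find s wa < PySem.Str.find s wb := by
  unfold has_list_b_words_after_list_a_alt
  rw [minmax_iff]
  simp only [List.mem_map, List.mem_filter]
  constructor
  · rintro ⟨a, ⟨wa, ⟨hwa, hin⟩, rfl⟩, b, ⟨wb, ⟨hwb, hinb⟩, rfl⟩, hab⟩
    exact ⟨wa, hwa, hin, wb, hwb, hinb, hab⟩
  · rintro ⟨wa, hwa, hin, wb, hwb, hinb, hab⟩
    exact ⟨_, ⟨wa, ⟨hwa, hin⟩, rfl⟩, _, ⟨wb, ⟨hwb, hinb⟩, rfl⟩, hab⟩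

-- ===== VERDICT (by name: the statement is the Claim_ definition above) =====
theorem has_list_b_words_after_list_a_spec : Claim_equal_has_list_b_words_after_list_a := by
  intro s la lb _
  unfold Spec_has_list_b_words_after_list_a
  rw [Bool.eq_iff_iff, portA_iff, portB_iff]
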